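-- pv_equiv track=rewrite | github.com/smk762/komodo-chains-validator | alerts/rpc_lib.py | calc_balance_delta
-- ===== SOURCE A (Python) =====
-- def calc_balance_delta(inputs, outputs):
--     deltas = {}
--     for addr in inputs:
--         if addr not in deltas:
--             val = inputs[addr]
--             deltas.update({addr:-1*val})
--         else:
--             val = deltas[addr]-inputs[addr]
--             deltas.update({addr:val})
--
--     for addr in outputs:
--         if addr not in deltas:
--             val = outputs[addr]
--             deltas.update({addr:val})
--         else:
--             val = deltas[addr]+outputs[addr]
--             deltas.update({addr:val})
--     return deltas
-- ===== SOURCE B (Python) =====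
-- def calc_balance_delta(inputs, outputs):
--     # one pass: delta per address = outputs.get(addr,0) - inputs.get(addr,0),
--     # keys in A's insertion order: inputs' keys, then outputs-only keys
--     keys = list(inputs) + [a for a in outputs if a not in inputs]
--     return {a: outputs.get(a, 0) - inputs.get(a, 0) for a in keys}
-- ===== Notes on version B (the rewrite author's own statement) =====
-- stated objective: simpler
-- what changed: A threads a mutable deltas dict through two sequential update loops with dead else-branches on the first pass; B builds the key union once and computes each delta directly as outputs.get(a,0)-inputs.get(a,0) in a single comprehension.
import Mathlib
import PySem

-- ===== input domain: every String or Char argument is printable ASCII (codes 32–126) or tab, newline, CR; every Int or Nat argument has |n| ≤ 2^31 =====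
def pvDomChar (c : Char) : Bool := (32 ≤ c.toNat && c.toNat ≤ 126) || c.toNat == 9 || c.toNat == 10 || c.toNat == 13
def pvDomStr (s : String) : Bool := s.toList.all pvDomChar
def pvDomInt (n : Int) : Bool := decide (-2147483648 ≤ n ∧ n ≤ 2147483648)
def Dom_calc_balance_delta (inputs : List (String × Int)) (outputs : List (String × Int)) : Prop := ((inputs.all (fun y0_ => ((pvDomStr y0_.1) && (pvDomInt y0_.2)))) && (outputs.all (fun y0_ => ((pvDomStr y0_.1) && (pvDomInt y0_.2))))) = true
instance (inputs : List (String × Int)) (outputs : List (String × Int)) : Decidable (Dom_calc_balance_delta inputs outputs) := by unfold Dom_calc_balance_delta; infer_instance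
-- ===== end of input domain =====

-- ===== PORT A =====
-- B changes only the decomposition: one union pass with default lookups instead of A's two
-- update loops over a mutable dict; same cost. No argument is mutated.
-- Literal port of A: deltas = {}; two loops over the dict keys, branching on membership.
-- deltas[addr] inside the else-branch is ported as getD _ 0, exact since contains holds there.
def calc_balance_delta (inputs : List (String × Int)) (outputs : List (String × Int)) : List (String × Int) :=
  let deltas : PySem.Dict String Int := PySem.Dict.empty
  let deltas := inputs.foldl (fun d p =>
    if d.contains p.1 = false then d.insert p.1 (-1 * p.2)
    else d.insert p.1 (d.getD p.1 0 - p.2)) deltas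
  let deltas := outputs.foldl (fun d p =>
    if d.contains p.1 = false then d.insert p.1 p.2
    else d.insert p.1 (d.getD p.1 0 + p.2)) deltas
  deltas.items

-- ===== PORT B =====
-- Literal port of Source B: the key-union list, then the dict comprehension; since the keys list
-- has no duplicates under Pre_, the comprehension's items are exactly the map over keys.
def calc_balance_delta_alt (inputs : List (String × Int)) (outputs : List (String × Int)) : List (String × Int) :=
  let keys := inputs.map Prod.fst ++ (outputs.map Prod.fst).filter (fun a => !(inputs.map Prod.fst).contains a)
  keys.map (fun a => (a, (PySem.Dict.mk outputs).getD a 0 - (PySem.Dict.mk inputs).getD a 0))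

-- ===== PRECONDITION & SPEC =====
-- Pre_ states the dict invariant: the association lists encoding the Python dict arguments
-- have pairwise-distinct keys (every Python dict satisfies it; nothing A accepts is excluded).
def Pre_calc_balance_delta (inputs : List (String × Int)) (outputs : List (String × Int)) : Prop :=
  (inputs.map Prod.fst).Nodup ∧ (outputs.map Prod.fst).Nodup
instance (inputs : List (String × Int)) (outputs : List (String × Int)) : Decidable (Pre_calc_balance_delta inputs outputs) := by unfold Pre_calc_balance_delta; infer_instance

def pvWitness_calc_balance_delta : (List (String × Int)) × (List (String × Int)) :=
  ([("a", 3), ("b", 2)], [("b", 5), ("c", 7)])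

def Spec_calc_balance_delta (inputs : List (String × Int)) (outputs : List (String × Int)) (out : List (String × Int)) : Prop := out = calc_balance_delta_alt inputs outputs
instance (inputs : List (String × Int)) (outputs : List (String × Int)) (out : List (String × Int)) : Decidable (Spec_calc_balance_delta inputs outputs out) := by unfold Spec_calc_balance_delta; infer_instance

-- ===== CLAIM (what is proved, stated in full; the proofs are below) =====
def Claim_equal_calc_balance_delta : Prop := ∀ (inputs : List (String × Int)) (outputs : List (String × Int)), Dom_calc_balance_delta inputs outputs → Pre_calc_balance_delta inputs outputs → Spec_calc_balance_delta inputs outputs (calc_balance_delta inputs outputs)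

-- ===== LEMMAS AND PROOFS =====

-- Both of A's loop bodies are a single insert of an arithmetic update of getD _ 0
-- (when the key is absent, getD is the neutral 0).
theorem pv_step1_eq (d : PySem.Dict String Int) (p : String × Int) :
    (if d.contains p.1 = false then d.insert p.1 (-1 * p.2)
     else d.insert p.1 (d.getD p.1 0 - p.2))
    = d.insert p.1 (d.getD p.1 0 - p.2) := by
  by_cases h : d.contains p.1 = false
  · rw [if_pos h, PySem.Dict.getD_of_not_contains d 0 h]; norm_num
  · simp [h]

theorem pv_step2_eq (d : PySem.Dict String Int) (p : String × Int) :
    (if d.contains p.1 = false then d.insert p.1 p.2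
     else d.insert p.1 (d.getD p.1 0 + p.2))
    = d.insert p.1 (d.getD p.1 0 + p.2) := by
  by_cases h : d.contains p.1 = false
  · rw [if_pos h, PySem.Dict.getD_of_not_contains d 0 h]; norm_num
  · simp [h]

-- getD on a literal dict whose key list misses k is the default.
theorem pv_getD_mk_of_not_mem (l : List (String × Int)) (k : String)
    (h : k ∉ l.map Prod.fst) : (PySem.Dict.mk l).getD k 0 = 0 := by
  apply PySem.Dict.getD_of_not_contains
  rw [PySem.Dict.contains_eq_decide_mem_keys]
  simp [PySem.Dict.keys, h]

-- getD on a literal cons dict: first match.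
theorem pv_getD_mk_cons (a : String) (v : Int) (rest : List (String × Int)) (k : String) :
    (PySem.Dict.mk ((a, v) :: rest)).getD k 0
      = if a = k then v else (PySem.Dict.mk rest).getD k 0 := by
  rw [PySem.Dict.getD_eq_get?_getD, PySem.Dict.get?_mk_cons]
  split <;> simp_all [PySem.Dict.getD_eq_get?_getD]

-- Phase 1 of A subtracts inputs[k] from every entry (seen as getD _ 0).
theorem pv_phase1 (inputs : List (String × Int)) (hn : (inputs.map Prod.fst).Nodup)
    (d : PySem.Dict String Int) (k : String) :
    (inputs.foldl (fun d p => d.insert p.1 (d.getD p.1 0 - p.2)) d).getD k 0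
      = d.getD k 0 - (PySem.Dict.mk inputs).getD k 0 := by
  induction inputs generalizing d with
  | nil => simp [PySem.Dict.getD_eq_get?_getD, PySem.Dict.get?]
  | cons p rest ih =>
    obtain ⟨a, v⟩ := p
    simp only [List.map_cons, List.nodup_cons] at hn
    rw [List.foldl_cons, ih hn.2, PySem.Dict.getD_insert, pv_getD_mk_cons]
    by_cases hk : k = a
    · subst hk
      simp [pv_getD_mk_of_not_mem rest _ hn.1]
    · simp [hk, Ne.symm hk]

-- Phase 2 of A adds outputs[k] to every entry (seen as getD _ 0).
theorem pv_phase2 (outputs : List (String × Int)) (hn : (outputs.map Prod.fst).Nodup)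
    (d : PySem.Dict String Int) (k : String) :
    (outputs.foldl (fun d p => d.insert p.1 (d.getD p.1 0 + p.2)) d).getD k 0
      = d.getD k 0 + (PySem.Dict.mk outputs).getD k 0 := by
  induction outputs generalizing d with
  | nil => simp [PySem.Dict.getD_eq_get?_getD, PySem.Dict.get?]
  | cons p rest ih =>
    obtain ⟨a, v⟩ := p
    simp only [List.map_cons, List.nodup_cons] at hn
    rw [List.foldl_cons, ih hn.2, PySem.Dict.getD_insert, pv_getD_mk_cons]
    by_cases hk : k = a
    · subst hk
      simp [pv_getD_mk_of_not_mem rest _ hn.1]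
    · simp [hk, Ne.symm hk]

-- ===== VERDICT (by name: the statement is the Claim_ definition above) =====
theorem calc_balance_delta_spec : Claim_equal_calc_balance_delta := by
  intro inputs outputs _ hpre
  obtain ⟨hin, hout⟩ := hpre
  unfold Spec_calc_balance_delta calc_balance_delta calc_balance_delta_alt
  simp only [pv_step1_eq, pv_step2_eq]
  set F := outputs.foldl (fun d p => d.insert p.1 (d.getD p.1 0 + p.2))
      (inputs.foldl (fun d p => d.insert p.1 (d.getD p.1 0 - p.2)) PySem.Dict.empty) with hF
  have hkeys : F.keys
      = inputs.map Prod.fst ++ (outputs.map Prod.fst).filter (fun a => !(inputs.map Prod.fst).contains a) := by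
    rw [hF]
    rw [PySem.Dict.keys_foldl_insert_key, PySem.Dict.keys_foldl_insert_key]
    rw [PySem.Dict.keys_empty]
    rw [PySem.Set.update_nil_left]
    rw [PySem.Set.update_eq_append_filter, PySem.Set.ofList_eq_self_of_nodup _ hin,
        PySem.Set.ofList_eq_self_of_nodup _ hout]
    simp
  have hnodup : F.keys.Nodup := by
    rw [hF]
    exact PySem.Dict.nodup_keys_foldl_insert_key _ _ _ _
      (PySem.Dict.nodup_keys_foldl_insert_key _ _ _ _ PySem.Dict.nodup_keys_empty)
  have hget : ∀ k, F.getD k 0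
      = (PySem.Dict.mk outputs).getD k 0 - (PySem.Dict.mk inputs).getD k 0 := by
    intro k
    rw [hF, pv_phase2 outputs hout, pv_phase1 inputs hin]
    have : (PySem.Dict.empty : PySem.Dict String Int).getD k 0 = 0 := by
      simp [PySem.Dict.getD_empty]
    rw [this]; ring
  rw [PySem.Dict.items_eq_map_keys F hnodup 0, hkeys]
  exact List.map_congr_left (fun k _ => by rw [hget k])
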